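-- pv_equiv track=rewrite | github.com/IU-hadlin/contextual-intent | method_stitch/event_type_labeler.py | extract_first_and_last_sentence
-- ===== SOURCE A (Python) =====
-- def extract_first_and_last_sentence(text: str) -> str:
--     """Extract first and last sentence from text, connected with '...'
--
--     Args:
--         text: Input text to extract sentences from
--
--     Returns:
--         First sentence + "..." + last sentence, or just the text if too short
--     """
--     if not text:
--         return ""
--
--     # Split into sentences (simple approach using common sentence terminators)
--     sentences = []
--     current = []
--
--     for char in text:
--         current.append(char)
--         if char in '.!?' and len(current) > 1:
--             sentence = ''.join(current).strip()
--             if sentence: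
--                 sentences.append(sentence)
--             current = []
--
--     # Add any remaining text as a sentence
--     if current:
--         sentence = ''.join(current).strip()
--         if sentence:
--             sentences.append(sentence)
--
--     if not sentences:
--         return text.strip()
--
--     # If only one sentence, return it
--     if len(sentences) == 1:
--         return sentences[0]
--
--     # Return first + "..." + last
--     return f"{sentences[0]} ... {sentences[-1]}"
-- ===== SOURCE B (Python) =====
-- def extract_first_and_last_sentence(text: str) -> str:
--     """Extract first and last sentence from text, connected with '...'"""
--     # Segment extraction by index scanning: each segment is one char followed by
--     # the run up to (and including) the next terminator, instead of a per-char
--     # accumulator loop with a closing condition.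
--     pieces = []
--     i, n = 0, len(text)
--     while i < n:
--         j = i + 1
--         while j < n and text[j] not in '.!?':
--             j += 1
--         if j < n:
--             j += 1
--         pieces.append(text[i:j])
--         i = j
--
--     sentences = [p.strip() for p in pieces if p.strip()]
--
--     if not sentences:
--         return text.strip()
--     if len(sentences) == 1:
--         return sentences[0]
--     return f"{sentences[0]} ... {sentences[-1]}"
-- ===== Notes on version B (the rewrite author's own statement) =====
-- stated objective: alternative
-- what changed: Replaces A's per-character accumulator loop with its closing condition (terminator and len(current)>1) by a direct segment scan: for each segment start, an inner scan jumps to the next terminator and slices the piece out, then the pieces are stripped and filtered in one comprehension.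
import Mathlib
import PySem

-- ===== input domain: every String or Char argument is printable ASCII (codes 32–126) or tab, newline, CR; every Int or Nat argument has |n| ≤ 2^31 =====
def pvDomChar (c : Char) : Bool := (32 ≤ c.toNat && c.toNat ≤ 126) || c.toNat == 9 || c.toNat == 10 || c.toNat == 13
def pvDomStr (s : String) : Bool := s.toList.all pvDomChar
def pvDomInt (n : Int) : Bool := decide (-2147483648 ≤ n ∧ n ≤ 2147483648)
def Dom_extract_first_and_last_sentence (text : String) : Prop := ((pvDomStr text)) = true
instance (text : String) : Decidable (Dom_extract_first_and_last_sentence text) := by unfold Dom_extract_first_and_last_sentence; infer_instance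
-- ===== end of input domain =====

-- B replaces A's per-character accumulator loop by a direct segment scan (jump to the
-- next terminator, slice the piece out), then strips and filters the pieces; same cost.

def pvTerm (c : Char) : Bool := c == '.' || c == '!' || c == '?'

-- ===== PORT A =====
-- A's for-loop over the characters with state (sentences, current)
def pvALoop : List Char → List (List Char) → List Char → List (List Char)
  | [], sents, cur =>
      -- "if current: …" after the loop
      if cur ≠ [] then
        (if PySem.Chars.strip cur ≠ [] then sents ++ [PySem.Chars.strip cur] else sents)
      else sents
  | ch :: rest, sents, cur =>
      let cur' := cur ++ [ch]
      if pvTerm ch && decide (cur'.length > 1) then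
        pvALoop rest
          (if PySem.Chars.strip cur' ≠ [] then sents ++ [PySem.Chars.strip cur'] else sents) []
      else pvALoop rest sents cur'

def extract_first_and_last_sentence (text : String) : String :=
  if text = "" then ""
  else
    let sentences := pvALoop text.toList [] []
    if sentences = [] then PySem.Str.strip text
    else if sentences.length = 1 then String.ofList sentences[0]!
    else String.ofList (sentences[0]! ++ (" ... ").toList ++ sentences.getLast!)

-- ===== PORT B =====
-- Source B's outer while: take the segment start, scan to the next terminator (inner while
-- = takeWhile/dropWhile of non-terminators), include it if present, recurse on the rest.
def pvBPieces : List Char → List (List Char)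
  | [] => []
  | c :: rest =>
      let seg := rest.takeWhile (fun d => !pvTerm d)
      match h : rest.dropWhile (fun d => !pvTerm d) with
      | [] => [c :: seg]
      | t :: rest' => (c :: (seg ++ [t])) :: pvBPieces rest'
termination_by l => l.length
decreasing_by
  have := List.length_dropWhile_le (fun d => !pvTerm d) rest
  rw [h] at this; simp at this ⊢; omega

def extract_first_and_last_sentence_alt (text : String) : String :=
  let sentences :=
    ((pvBPieces text.toList).map PySem.Chars.strip).filter (fun s => s ≠ [])
  if sentences = [] then PySem.Str.strip text
  else if sentences.length = 1 then String.ofList sentences[0]!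
  else String.ofList (sentences[0]! ++ (" ... ").toList ++ sentences.getLast!)

-- ===== PRECONDITION & SPEC =====
def Spec_extract_first_and_last_sentence (text : String) (out : String) : Prop := out = extract_first_and_last_sentence_alt text
instance (text : String) (out : String) : Decidable (Spec_extract_first_and_last_sentence text out) := by unfold Spec_extract_first_and_last_sentence; infer_instance

-- ===== CLAIM (what is proved, stated in full; the proofs are below) =====
def Claim_equal_extract_first_and_last_sentence : Prop := ∀ (text : String), Dom_extract_first_and_last_sentence text → Spec_extract_first_and_last_sentence text (extract_first_and_last_sentence text)

-- ===== LEMMAS AND PROOFS =====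

-- strip-and-filter of a piece list (the sentence list both programs build)
def pvFS (l : List (List Char)) : List (List Char) :=
  (l.map PySem.Chars.strip).filter (fun s => s ≠ [])

-- pieces still to be produced when A's loop holds `cur` and `rest` remains
def pvP : List Char → List Char → List (List Char)
  | [], rest => pvBPieces rest
  | c :: cs, rest =>
      let seg := rest.takeWhile (fun d => !pvTerm d)
      match rest.dropWhile (fun d => !pvTerm d) with
      | [] => [(c :: cs) ++ seg]
      | t :: rest' => ((c :: cs) ++ seg ++ [t]) :: pvBPieces rest'

lemma pvP_cons_eq (c : Char) (rest : List Char) :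
    pvP [] (c :: rest) = pvP [c] rest := by
  simp only [pvP, pvBPieces]
  rcases rest.dropWhile (fun d => !pvTerm d) with _ | ⟨t, rest'⟩ <;> simp

lemma pvP_shift (p : List Char) (hp : p ≠ []) (ch : Char) (hch : pvTerm ch = false)
    (rest : List Char) : pvP p (ch :: rest) = pvP (p ++ [ch]) rest := by
  rcases p with _ | ⟨c, cs⟩
  · exact absurd rfl hp
  · simp only [pvP, List.takeWhile_cons, List.dropWhile_cons, hch]
    rcases cs with _ | ⟨c₂, cs₂⟩ <;>
      · simp only [List.cons_append, List.nil_append]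
        rcases rest.dropWhile (fun d => !pvTerm d) with _ | ⟨t, rest'⟩ <;> simp

lemma pvALoop_nil (sents : List (List Char)) (cur : List Char) :
    pvALoop [] sents cur = sents ++ pvFS (pvP cur []) := by
  rcases cur with _ | ⟨c, cs⟩
  · simp [pvALoop, pvP, pvBPieces, pvFS]
  · by_cases hs : PySem.Chars.strip (c :: cs) = [] <;>
      simp [pvALoop, pvP, pvFS, hs]

lemma pvALoop_eq_aux (n : Nat) : ∀ (rest : List Char), rest.length ≤ n → ∀ sents cur,
    pvALoop rest sents cur = sents ++ pvFS (pvP cur rest) := by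
  induction n with
  | zero =>
    intro rest hlen sents cur
    rcases rest with _ | ⟨ch, r⟩
    · exact pvALoop_nil sents cur
    · simp at hlen
  | succ n IH =>
    intro rest hlen sents cur
    rcases rest with _ | ⟨ch, r⟩
    · exact pvALoop_nil sents cur
    · have hr : r.length ≤ n := by simp at hlen; omega
      rcases cur with _ | ⟨c, cs⟩
      · -- current empty: first char never closes
        simp only [pvALoop, List.nil_append, List.length_cons, List.length_nil]
        rw [if_neg (by simp)]
        rw [IH r hr, pvP_cons_eq]
      · by_cases hterm : pvTerm ch = true
        · -- terminator closes: current is nonempty so len > 1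
          simp only [pvALoop, hterm, List.length_append, List.length_cons, List.length_nil]
          rw [if_pos (by simp only [Bool.true_and, decide_eq_true_eq]; omega)]
          rw [IH r hr]
          simp only [pvP, List.takeWhile_cons, List.dropWhile_cons, hterm,
            Bool.not_true]
          by_cases hs : PySem.Chars.strip (c :: (cs ++ [ch])) = [] <;>
            simp [pvFS, hs]
        · -- not a terminator: extend current
          have hf : pvTerm ch = false := by simpa using hterm
          simp only [pvALoop, hf, Bool.false_and, Bool.false_eq_true, if_false]
          rw [IH r hr, pvP_shift (c :: cs) (by simp) ch hf r]

lemma pvSentences_eq (text : String) :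
    pvALoop text.toList [] [] =
      ((pvBPieces text.toList).map PySem.Chars.strip).filter (fun s => s ≠ []) := by
  rw [pvALoop_eq_aux text.toList.length text.toList le_rfl]; rfl

-- ===== VERDICT (by name: the statement is the Claim_ definition above) =====
theorem extract_first_and_last_sentence_spec : Claim_equal_extract_first_and_last_sentence := by
  intro text _
  unfold Spec_extract_first_and_last_sentence
  unfold extract_first_and_last_sentence extract_first_and_last_sentence_alt
  by_cases h : text = ""
  · subst h
    simp [pvBPieces, PySem.Str.strip, PySem.Chars.strip, PySem.Chars.lstrip, PySem.Chars.rstrip]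
  · simp only [h, if_false]
    rw [pvSentences_eq]
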